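-- pv_equiv track=rewrite | github.com/jgallaway2011/censor-dispenser | censor_dispenser.py | censor_format
-- ===== SOURCE A (Python) =====
-- punctuation_after = [" ", ",", "!", "?", ".", "%", "/", ")"]
--
-- punctuation_before = ["("]
--
-- def censor_format(text_to_censor):
--     censored_text = ""
--     for i in range(len(text_to_censor)):
--         if text_to_censor[i] in punctuation_after or text_to_censor[i] in punctuation_before:
--             censored_text += text_to_censor[i]
--         else:
--             censored_text += "*"
--     return censored_text
-- ===== SOURCE B (Python) =====
-- PUNCT = " ,!?.%/()"
--
-- def censor_format(text_to_censor):
--     # Chunk scanner: repeatedly find the nearest punctuation occurrence (via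
--     # str.find per punctuation char), emit a run of stars up to it, keep it,
--     # and continue on the remainder.
--     chunks = []
--     rest = text_to_censor
--     while rest:
--         nxt = len(rest)
--         for p in PUNCT:
--             j = rest.find(p)
--             if j != -1 and j < nxt:
--                 nxt = j
--         chunks.append("*" * nxt)
--         if nxt < len(rest):
--             chunks.append(rest[nxt])
--             rest = rest[nxt + 1:]
--         else:
--             rest = ""
--     return "".join(chunks)
-- ===== Notes on version B (the rewrite author's own statement) =====
-- stated objective: faster
-- what changed: B is a chunk scanner: instead of A's per-character index loop with two list membership tests and quadratic string concatenation, it repeatedly locates the nearest punctuation occurrence with str.find over the nine punctuation characters, emits a whole run of asterisks up to it, keeps that character, continues on the remaining suffix, and joins the chunks once.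
import Mathlib
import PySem

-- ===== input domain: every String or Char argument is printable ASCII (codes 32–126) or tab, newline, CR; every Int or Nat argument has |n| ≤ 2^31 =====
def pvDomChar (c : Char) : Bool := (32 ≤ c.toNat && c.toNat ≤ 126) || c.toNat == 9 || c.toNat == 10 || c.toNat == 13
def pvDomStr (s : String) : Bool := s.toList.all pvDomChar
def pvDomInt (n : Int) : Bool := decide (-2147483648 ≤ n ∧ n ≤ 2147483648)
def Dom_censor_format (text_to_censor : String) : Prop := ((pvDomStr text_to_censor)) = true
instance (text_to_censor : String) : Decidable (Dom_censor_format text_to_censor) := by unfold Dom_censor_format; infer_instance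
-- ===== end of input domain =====

-- B replaces A's per-character loop by a chunk scanner: find the nearest punctuation
-- occurrence via str.find, emit a run of stars up to it, keep it, recurse on the rest.

-- ===== PORT A =====
def punctuation_after : List Char := [' ', ',', '!', '?', '.', '%', '/', ')']

def punctuation_before : List Char := ['(']

def censor_format (text_to_censor : String) : String :=
  String.mk ((PySem.List.pyRange 0 (text_to_censor.toList.length : Int) 1).foldl
    (fun censored_text i =>
      let c := PySem.List.pyGetD text_to_censor.toList i ' '
      if punctuation_after.contains c || punctuation_before.contains c then
        censored_text ++ [c]
      else
        censored_text ++ ['*'])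
    [])

-- ===== PORT B =====
def pvPUNCT : List Char := [' ', ',', '!', '?', '.', '%', '/', '(', ')']

-- nxt = len(rest); for p in PUNCT: j = rest.find(p); if j != -1 and j < nxt: nxt = j
def pvNext (rest : List Char) : Int :=
  pvPUNCT.foldl
    (fun nxt p =>
      let j := PySem.Chars.find rest [p]
      if j ≠ -1 ∧ j < nxt then j else nxt)
    (rest.length : Int)

-- the while loop of Source B; rest[nxt] is read with pyGetD (exact: 0 ≤ nxt < len there),
-- rest[nxt+1:] is the drop; the appended chunks are emitted in order.
def pvCensorGo (rest : List Char) : List Char :=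
  if _h : rest = [] then []
  else
    let nxt := pvNext rest
    if h2 : nxt < (rest.length : Int) then
      List.replicate nxt.toNat '*' ++ [PySem.List.pyGetD rest nxt ' ']
        ++ pvCensorGo (rest.drop (nxt.toNat + 1))
    else
      List.replicate rest.length '*'
termination_by rest.length
decreasing_by
  simp only [List.length_drop]
  have : rest.length ≠ 0 := by simpa [List.length_eq_zero_iff] using _h
  omega

def censor_format_alt (text_to_censor : String) : String :=
  String.mk (pvCensorGo text_to_censor.toList)

-- ===== PRECONDITION & SPEC =====
def Spec_censor_format (text_to_censor : String) (out : String) : Prop := out = censor_format_alt text_to_censor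
instance (text_to_censor : String) (out : String) : Decidable (Spec_censor_format text_to_censor out) := by unfold Spec_censor_format; infer_instance

-- ===== CLAIM (what is proved, stated in full; the proofs are below) =====
def Claim_equal_censor_format : Prop := ∀ (text_to_censor : String), Dom_censor_format text_to_censor → Spec_censor_format text_to_censor (censor_format text_to_censor)

-- ===== LEMMAS AND PROOFS =====

def pvF (c : Char) : Char :=
  if punctuation_after.contains c || punctuation_before.contains c then c else '*'

lemma pvA_eq_map (cs : List Char) :
    (PySem.List.pyRange 0 (cs.length : Int) 1).foldl
      (fun acc i =>
        let c := PySem.List.pyGetD cs i ' '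
        if punctuation_after.contains c || punctuation_before.contains c then
          acc ++ [c]
        else
          acc ++ ['*'])
      [] = cs.map pvF := by
  have hf : (fun (acc : List Char) (i : Int) =>
        let c := PySem.List.pyGetD cs i ' '
        if punctuation_after.contains c || punctuation_before.contains c then
          acc ++ [c]
        else
          acc ++ ['*'])
      = fun acc i => acc ++ [pvF (PySem.List.pyGetD cs i ' ')] := by
    funext acc i
    simp only [pvF]
    split <;> rfl
  rw [hf, PySem.List.foldl_append_singleton_eq_map]
  have : (fun i => pvF (PySem.List.pyGetD cs i ' '))
      = pvF ∘ (fun j => PySem.List.pyGetD cs j ' ') := rfl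
  rw [this, ← List.map_map]
  have hlen : (cs.length : Int) = PySem.List.len cs := by simp [PySem.List.len]
  rw [hlen, PySem.List.map_pyGetD_pyRange_zero]
  simp

lemma pvF_of_punct {c : Char} (h : c ∈ pvPUNCT) : pvF c = c := by
  fin_cases h <;> rfl

lemma pvF_of_not_punct {c : Char} (h : c ∉ pvPUNCT) : pvF c = '*' := by
  simp only [pvF]
  split
  · exfalso
    rename_i hk
    rcases Bool.or_eq_true_iff.mp hk with hk | hk <;>
      simp [punctuation_after, punctuation_before, pvPUNCT] at hk h <;> tauto
  · rfl

-- singleton-pattern prefix of a drop reads one character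
lemma pvPrefix_drop_iff (p : Char) (l : List Char) (i : Nat) :
    [p] <+: l.drop i ↔ l[i]? = some p := by
  rw [← List.head?_drop]
  constructor
  · rintro ⟨t, ht⟩; rw [← ht]; rfl
  · intro h
    cases hd : l.drop i with
    | nil => rw [hd] at h; simp at h
    | cons a t => rw [hd] at h; simp at h; subst h; exact ⟨t, rfl⟩

-- what one str.find of one punctuation character tells us
lemma pvFind_spec (rest : List Char) (p : Char) :
    (PySem.Chars.find rest [p] ≠ -1 →
      0 ≤ PySem.Chars.find rest [p] ∧
      rest[(PySem.Chars.find rest [p]).toNat]? = some p ∧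
      ∀ k < (PySem.Chars.find rest [p]).toNat, rest[k]? ≠ some p) ∧
    (PySem.Chars.find rest [p] = -1 → ∀ k : Nat, rest[k]? ≠ some p) := by
  constructor
  · intro hne
    have h0 : 0 ≤ PySem.Chars.find rest [p] := by
      rw [PySem.Chars.find_nonneg_iff, ← PySem.Chars.find_ne_neg_one_iff]; exact hne
    obtain ⟨h1, h2⟩ := PySem.Chars.find_spec (s := rest) (sub := [p]) h0
    refine ⟨h0, (pvPrefix_drop_iff _ _ _).mp h1, ?_⟩
    intro k hk hc
    exact h2 k hk ((pvPrefix_drop_iff _ _ _).mpr hc)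
  · intro he k hc
    have hni : ¬ ([p] <:+: rest) := (PySem.Chars.find_eq_neg_one_iff _ _).mp he
    obtain ⟨t, ht⟩ := (pvPrefix_drop_iff p rest k).mpr hc
    exact hni ⟨rest.take k, t, by rw [List.append_assoc, ht, List.take_append_drop]⟩

-- invariant of the inner 'for p in PUNCT' fold
lemma pvNext_fold (rest : List Char) : ∀ (ps : List Char), (∀ p ∈ ps, p ∈ pvPUNCT) → ∀ (a : Int),
    0 ≤ a → a ≤ (rest.length : Int) →
    (let r := ps.foldl
        (fun nxt p =>
          let j := PySem.Chars.find rest [p]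
          if j ≠ -1 ∧ j < nxt then j else nxt) a
     0 ≤ r ∧ r ≤ a ∧
     (r < a → ∃ q ∈ pvPUNCT, rest[r.toNat]? = some q) ∧
     (∀ p ∈ ps, ∀ k < r.toNat, rest[k]? ≠ some p)) := by
  intro ps
  induction ps with
  | nil =>
    intro _ a h0 hl
    exact ⟨h0, le_refl _, fun h => absurd h (lt_irrefl a), by simp⟩
  | cons p ps ih =>
    intro hsub a h0 hl
    have hsub' : ∀ q ∈ ps, q ∈ pvPUNCT := fun q hq => hsub q (List.mem_cons_of_mem p hq)
    have hp : p ∈ pvPUNCT := hsub p List.mem_cons_self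
    simp only [List.foldl_cons]
    by_cases hc : PySem.Chars.find rest [p] ≠ -1 ∧ PySem.Chars.find rest [p] < a
    · rw [if_pos hc]
      obtain ⟨hne, hlt⟩ := hc
      obtain ⟨hj0, hjat, hjmin⟩ := (pvFind_spec rest p).1 hne
      obtain ⟨r0, rle, rat, rmin⟩ := ih hsub' (PySem.Chars.find rest [p]) hj0
        (le_of_lt (lt_of_lt_of_le hlt hl))
      refine ⟨r0, (lt_of_le_of_lt rle hlt).le, ?_, ?_⟩
      · intro _
        rcases lt_or_eq_of_le rle with h | h
        · exact rat h
        · exact ⟨p, hp, by rw [h]; exact hjat⟩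
      · intro q hq k hk
        rcases List.mem_cons.mp hq with hq | hq
        · subst hq
          exact hjmin k (lt_of_lt_of_le hk (Int.toNat_le_toNat rle))
        · exact rmin q hq k hk
    · rw [if_neg hc]
      obtain ⟨r0, rle, rat, rmin⟩ := ih hsub' a h0 hl
      refine ⟨r0, rle, rat, ?_⟩
      intro q hq k hk
      rcases List.mem_cons.mp hq with hq | hq
      · subst hq
        by_cases he : PySem.Chars.find rest [q] = -1
        · exact (pvFind_spec rest q).2 he k
        · push_neg at hc
          have hge := hc he
          obtain ⟨hj0, _, hjmin⟩ := (pvFind_spec rest q).1 he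
          exact hjmin k (lt_of_lt_of_le hk (Int.toNat_le_toNat (le_trans rle hge)))
      · exact rmin q hq k hk

-- pvNext specialised: lowest index of any punctuation character, or the length
lemma pvNext_spec (rest : List Char) :
    0 ≤ pvNext rest ∧ pvNext rest ≤ (rest.length : Int) ∧
    (pvNext rest < (rest.length : Int) → ∃ q ∈ pvPUNCT, rest[(pvNext rest).toNat]? = some q) ∧
    (∀ p ∈ pvPUNCT, ∀ k < (pvNext rest).toNat, rest[k]? ≠ some p) :=
  pvNext_fold rest pvPUNCT (fun _ h => h) (rest.length : Int) (by positivity) (le_refl _)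

-- the chunk scanner computes the per-character censoring
lemma pvGo_eq_map : ∀ (n : Nat) (rest : List Char), rest.length ≤ n →
    pvCensorGo rest = rest.map pvF := by
  intro n
  induction n with
  | zero =>
    intro rest h
    have : rest = [] := List.length_eq_zero_iff.mp (Nat.le_zero.mp h)
    subst this
    rw [pvCensorGo]
    simp
  | succ n ih =>
    intro rest hlen
    rw [pvCensorGo]
    by_cases hnil : rest = []
    · simp [hnil]
    · rw [dif_neg hnil]
      obtain ⟨r0, rle, rat, rmin⟩ := pvNext_spec rest
      have hnp : ∀ k < (pvNext rest).toNat, rest[k]? ∉ (pvPUNCT.map some) := by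
        intro k hk hmem
        obtain ⟨q, hq, hqe⟩ := List.mem_map.mp hmem
        exact rmin q hq k hk hqe.symm
      by_cases h2 : pvNext rest < (rest.length : Int)
      · rw [dif_pos h2]
        have hkr : (pvNext rest).toNat < rest.length := by omega
        obtain ⟨q, hqmem, hqe⟩ := rat h2
        have hget : rest[(pvNext rest).toNat] = q := by
          rw [List.getElem?_eq_getElem hkr] at hqe
          exact Option.some.inj hqe
        have htake : (rest.take (pvNext rest).toNat).map pvF
            = List.replicate (pvNext rest).toNat '*' := by
          apply List.eq_replicate_iff.mpr
          constructor
          · simp [hkr.le]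
          · intro b hb
            obtain ⟨c, hc, rfl⟩ := List.mem_map.mp hb
            obtain ⟨k, hk, hck⟩ := List.mem_take_iff_getElem.mp hc
            apply pvF_of_not_punct
            intro hcp
            refine hnp k (by omega) ?_
            rw [List.getElem?_eq_getElem (by omega : k < rest.length), hck]
            exact List.mem_map.mpr ⟨c, hcp, rfl⟩
        have hdrop : rest.drop (pvNext rest).toNat
            = rest[(pvNext rest).toNat] :: rest.drop ((pvNext rest).toNat + 1) :=
          (List.getElem_cons_drop hkr).symm
        have hmap : rest.map pvF
            = (rest.take (pvNext rest).toNat).map pvF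
              ++ pvF rest[(pvNext rest).toNat]
                :: (rest.drop ((pvNext rest).toNat + 1)).map pvF := by
          conv_lhs => rw [← List.take_append_drop (pvNext rest).toNat rest]
          rw [List.map_append, hdrop]
          rfl
        rw [hmap, htake, pvF_of_punct (hget ▸ hqmem), hget]
        have hdg : PySem.List.pyGetD rest (pvNext rest) ' ' = q := by
          rw [PySem.List.pyGetD_eq_getElem]
          · exact hget
          · exact r0
          · simpa [PySem.List.len] using h2
        rw [hdg, ih (rest.drop ((pvNext rest).toNat + 1)) (by simp; omega)]
        simp
      · rw [dif_neg h2]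
        have hre : (pvNext rest).toNat = rest.length := by omega
        symm
        apply List.eq_replicate_iff.mpr
        refine ⟨by simp, ?_⟩
        intro b hb
        obtain ⟨c, hc, rfl⟩ := List.mem_map.mp hb
        obtain ⟨k, hk, hck⟩ := List.mem_iff_getElem.mp hc
        apply pvF_of_not_punct
        intro hcp
        refine hnp k (by omega) ?_
        rw [List.getElem?_eq_getElem hk, hck]
        exact List.mem_map.mpr ⟨c, hcp, rfl⟩

-- ===== VERDICT (by name: the statement is the Claim_ definition above) =====
theorem censor_format_spec : Claim_equal_censor_format := by
  intro t _
  show censor_format t = censor_format_alt t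
  unfold censor_format censor_format_alt
  rw [pvA_eq_map, pvGo_eq_map t.toList.length t.toList (le_refl _)]
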